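-- pv_equiv track=rewrite | github.com/momofodr/CSC636 | Util_SmartExchange/weight_sparsity_analysis.py | compute_overhead
-- ===== SOURCE A (Python) =====
-- def compute_overhead(encoding, bit=4):
--     cnt_overhead = 0
--     cnt_zero = 0
--     for item in encoding:
--         if item or cnt_zero == 2**bit:
--             cnt_overhead += 1
--             cnt_zero = 0
--         else:
--             cnt_zero += 1
--
--     return bit * cnt_overhead
-- ===== SOURCE B (Python) =====
-- def compute_overhead(encoding, bit=4):
--     # Run-length pass: each truthy item costs one overhead entry; a maximal
--     # run of L zeros overflows the zero counter (capacity 2**bit) exactly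
--     # L // (2**bit + 1) times, and the counter resets across runs.
--     cnt = 0
--     i = 0
--     n = len(encoding)
--     while i < n:
--         j = i
--         if encoding[i]:
--             while j < n and encoding[j]:
--                 j += 1
--             cnt += j - i
--         else:
--             while j < n and not encoding[j]:
--                 j += 1
--             cnt += (j - i) // (2**bit + 1)
--         i = j
--     return bit * cnt
-- ===== Notes on version B (the rewrite author's own statement) =====
-- stated objective: alternative
-- what changed: replaces the per-element running zero-counter with a run-length pass: each maximal truthy run contributes its length and each maximal run of L zeros contributes L // (2**bit + 1) counter overflows; Pre_ excludes negative bit, which is outside the natural domain of a bit-width parameter (there A's threshold 2**bit is a fractional float and B's floor division returns a float).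
-- outside the precondition, e.g. on compute_overhead([0, 0], -1): A returns 0, B returns -1.0
import Mathlib
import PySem

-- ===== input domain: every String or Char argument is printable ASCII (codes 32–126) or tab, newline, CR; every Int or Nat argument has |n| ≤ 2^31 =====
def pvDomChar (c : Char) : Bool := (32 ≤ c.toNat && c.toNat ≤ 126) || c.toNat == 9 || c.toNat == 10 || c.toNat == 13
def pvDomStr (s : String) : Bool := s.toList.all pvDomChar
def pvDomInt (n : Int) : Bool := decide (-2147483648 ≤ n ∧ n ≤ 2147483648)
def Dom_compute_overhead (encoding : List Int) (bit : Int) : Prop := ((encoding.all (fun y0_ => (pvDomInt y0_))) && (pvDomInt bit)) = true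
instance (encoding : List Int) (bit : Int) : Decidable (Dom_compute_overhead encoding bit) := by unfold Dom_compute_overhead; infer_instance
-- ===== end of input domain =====

-- B replaces A's per-element running zero-counter with a run-length pass over maximal runs
-- (alternative decomposition, same O(n) cost); equivalence is claimed for 0 ≤ bit.

-- ===== PORT A =====
-- state = (cnt_overhead, cnt_zero); Python condition `item or cnt_zero == 2**bit`.
-- For 0 ≤ bit the threshold is the integer 2^bit — exact there (= on all of Pre_).
-- For bit < 0, Python's 2**bit is a float: it underflows to 0.0 exactly when
-- bit ≤ -1075 (IEEE-754 double), and otherwise lies strictly between 0 and 1,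
-- never equal to the integer counter — modelled exactly by threshold 0 resp. -1.
def compute_overhead (encoding : List Int) (bit : Int) : Int :=
  bit *
    (encoding.foldl
      (fun (st : Int × Int) (item : Int) =>
        if item ≠ 0 ∨ st.2 = (if 0 ≤ bit then 2 ^ bit.toNat else if bit ≤ -1075 then 0 else -1) then (st.1 + 1, 0)
        else (st.1, st.2 + 1))
      (0, 0)).1

-- ===== PORT B =====
-- inner `while` loops of Source B: length of the maximal prefix satisfying p, and the rest
def pvSpanB (p : Int → Bool) : List Int → Nat × List Int
  | [] => (0, [])
  | x :: xs => if p x then ((pvSpanB p xs).1 + 1, (pvSpanB p xs).2) else (0, x :: xs)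

theorem pvSpanB_len_le (p : Int → Bool) : ∀ l : List Int, (pvSpanB p l).2.length ≤ l.length := by
  intro l
  induction l with
  | nil => simp [pvSpanB]
  | cons x xs ih =>
    simp only [pvSpanB]
    split <;> simp
    omega

-- outer `while` of Source B, one step per maximal run; Source B's period = 2**bit + 1 is the
-- integer 2^bit + 1 on all of Pre_ (0 ≤ bit), where this port is exact (for bit < 0
-- Source B's period is a float and its result a float, which is no value of this type).
def pvRunsB (bit : Int) : List Int → Int
  | [] => 0
  | x :: xs =>
    if x ≠ 0 then
      (1 + ((pvSpanB (fun y => y != 0) xs).1 : Int)) + pvRunsB bit (pvSpanB (fun y => y != 0) xs).2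
    else
      PySem.Int.floordiv (1 + ((pvSpanB (fun y => y == 0) xs).1 : Int)) (2 ^ bit.toNat + 1)
        + pvRunsB bit (pvSpanB (fun y => y == 0) xs).2
termination_by l => l.length
decreasing_by
  · have := pvSpanB_len_le (fun y => y != 0) xs; simp; omega
  · have := pvSpanB_len_le (fun y => y == 0) xs; simp; omega

def compute_overhead_alt (encoding : List Int) (bit : Int) : Int :=
  bit * pvRunsB bit encoding

-- ===== PRECONDITION & SPEC =====
-- Pre_ excludes bit < 0: a negative bit width is outside the function's natural domain
-- (there A's float threshold 2**bit is fractional and B's floor division yields a float).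
def Pre_compute_overhead (encoding : List Int) (bit : Int) : Prop := 0 ≤ bit
instance (encoding : List Int) (bit : Int) : Decidable (Pre_compute_overhead encoding bit) := by unfold Pre_compute_overhead; infer_instance
def pvWitness_compute_overhead : List Int × Int := ([1, 0, 0, 0, 2, 0], 1)
def Spec_compute_overhead (encoding : List Int) (bit : Int) (out : Int) : Prop := out = compute_overhead_alt encoding bit
instance (encoding : List Int) (bit : Int) (out : Int) : Decidable (Spec_compute_overhead encoding bit out) := by unfold Spec_compute_overhead; infer_instance

-- ===== CLAIM (what is proved, stated in full; the proofs are below) =====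
def Claim_equal_compute_overhead : Prop := ∀ (encoding : List Int) (bit : Int), Dom_compute_overhead encoding bit → Pre_compute_overhead encoding bit → Spec_compute_overhead encoding bit (compute_overhead encoding bit)

-- ===== LEMMAS AND PROOFS =====

-- A's loop as a tail recursion on the list, threshold M
def pvGo (M c z : Int) : List Int → Int
  | [] => c
  | x :: xs => if x ≠ 0 ∨ z = M then pvGo M (c + 1) 0 xs else pvGo M c (z + 1) xs

theorem pvFold_eq_go (M : Int) : ∀ (l : List Int) (c z : Int),
    (l.foldl (fun (st : Int × Int) (item : Int) =>
        if item ≠ 0 ∨ st.2 = M then (st.1 + 1, 0) else (st.1, st.2 + 1)) (c, z)).1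
      = pvGo M c z l := by
  intro l
  induction l with
  | nil => intro c z; simp [pvGo]
  | cons x xs ih =>
    intro c z
    simp only [List.foldl, pvGo]
    split_ifs with h <;> exact ih _ _

-- the rest of a span either is empty or starts with an element failing p
theorem pvSpanB_head (p : Int → Bool) : ∀ l : List Int,
    ∀ y ∈ ((pvSpanB p l).2).head?, p y = false := by
  intro l
  induction l with
  | nil => simp [pvSpanB]
  | cons x xs ih =>
    by_cases h : p x = true
    · simpa [pvSpanB, h] using ih
    · intro y hy
      simp [pvSpanB, h] at hy
      rw [← hy]
      simpa using h

-- running A's loop over a maximal nonzero run adds its length and leaves cnt_zero = 0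
theorem pvGo_nonzero_run (M : Int) : ∀ (l : List Int) (c : Int),
    pvGo M c 0 l
      = pvGo M (c + ((pvSpanB (fun y => y != 0) l).1 : Int)) 0 (pvSpanB (fun y => y != 0) l).2 := by
  intro l
  induction l with
  | nil => intro c; simp [pvSpanB]
  | cons x xs ih =>
    intro c
    by_cases hx : x = 0
    · subst hx
      simp [pvSpanB]
    · have hb : (x != 0) = true := by simpa using hx
      simp only [pvSpanB, hb, if_true]
      have h1 : pvGo M c 0 (x :: xs) = pvGo M (c + 1) 0 xs := by
        simp [pvGo, hx]
      rw [h1, ih (c + 1)]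
      congr 1
      push_cast
      ring

-- running A's loop over a maximal zero run from counter z performs floor division by M+1
theorem pvGo_zero_run (M : Int) : ∀ (l : List Int) (c z : Int), 0 ≤ z → z ≤ M →
    pvGo M c z l
      = pvGo M (c + (z + ((pvSpanB (fun y => y == 0) l).1 : Int)) / (M + 1))
          ((z + ((pvSpanB (fun y => y == 0) l).1 : Int)) % (M + 1))
          (pvSpanB (fun y => y == 0) l).2 := by
  intro l
  induction l with
  | nil =>
    intro c z h0 hM
    have hd : z / (M + 1) = 0 := Int.ediv_eq_zero_of_lt h0 (by omega)
    have hm : z % (M + 1) = z := Int.emod_eq_of_lt h0 (by omega)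
    simp [pvSpanB, pvGo, hd, hm]
  | cons x xs ih =>
    intro c z h0 hM
    by_cases hx : x = 0
    · subst hx
      have hb : ((0 : Int) == 0) = true := by simp
      simp only [pvSpanB, hb, if_true]
      by_cases hz : z = M
      · have h1 : pvGo M c z (0 :: xs) = pvGo M (c + 1) 0 xs := by
          simp [pvGo, hz]
        rw [h1, ih (c + 1) 0 le_rfl (by omega)]
        have key : ∀ n : Int,
            c + 1 + (0 + n) / (M + 1) = c + (z + (n + 1)) / (M + 1)
            ∧ (0 + n) % (M + 1) = (z + (n + 1)) % (M + 1) := by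
          intro n
          have hzn : z + (n + 1) = n + (M + 1) * 1 := by omega
          constructor
          · rw [hzn, Int.add_mul_ediv_left _ _ (by omega : M + 1 ≠ 0)]
            ring_nf
          · rw [hzn, Int.add_mul_emod_self_left]
            ring_nf
        obtain ⟨k1, k2⟩ := key ((pvSpanB (fun y => y == 0) xs).1 : Int)
        rw [k1, k2]
        push_cast
        ring_nf
      · have h1 : pvGo M c z (0 :: xs) = pvGo M c (z + 1) xs := by
          simp [pvGo, hz]
        rw [h1, ih c (z + 1) (by omega) (by omega)]
        have harg : ∀ n : Int, z + 1 + n = z + (n + 1) := by intro n; ring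
        rw [harg]
        push_cast
        ring_nf
    · have hb : (x == 0) = false := by simpa using hx
      simp only [pvSpanB, hb]
      have hd : z / (M + 1) = 0 := Int.ediv_eq_zero_of_lt h0 (by omega)
      have hm : z % (M + 1) = z := Int.emod_eq_of_lt h0 (by omega)
      simp [hd, hm]

-- the zero counter is irrelevant when the list is empty or starts with a nonzero element
theorem pvGo_head_irrel (M c z : Int) (l : List Int)
    (h : ∀ y ∈ l.head?, y ≠ 0) : pvGo M c z l = pvGo M c 0 l := by
  cases l with
  | nil => rfl
  | cons y l' =>
    have hy : y ≠ 0 := h y (by simp)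
    simp [pvGo, hy]

theorem pvGo_eq_runs (bit : Int) (_hbit : 0 ≤ bit) : ∀ (k : Nat) (l : List Int), l.length ≤ k →
    ∀ c : Int, pvGo (2 ^ bit.toNat) c 0 l = c + pvRunsB bit l := by
  have hM : (1 : Int) ≤ 2 ^ bit.toNat := one_le_pow₀ (by norm_num)
  intro k
  induction k with
  | zero =>
    intro l hl c
    have : l = [] := by cases l <;> simp_all
    subst this
    simp [pvGo, pvRunsB]
  | succ k ih =>
    intro l hl c
    cases l with
    | nil => simp [pvGo, pvRunsB]
    | cons x xs =>
      by_cases hx : x = 0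
      · subst hx
        have hspan := pvGo_zero_run (2 ^ bit.toNat) ((0 : Int) :: xs) c 0 le_rfl (by omega)
        have hb : ((0 : Int) == 0) = true := by simp
        simp only [pvSpanB, hb, if_true] at hspan
        set n := (pvSpanB (fun y => y == 0) xs).1 with hn
        set r := (pvSpanB (fun y => y == 0) xs).2 with hr
        have hhead : ∀ y ∈ r.head?, y ≠ 0 := by
          intro y hy
          have := pvSpanB_head (fun y => y == 0) xs y hy
          simpa using this
        have hrl : r.length ≤ k := by
          have := pvSpanB_len_le (fun y => y == 0) xs
          simp at hl
          rw [← hr] at this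
          omega
        rw [hspan, pvGo_head_irrel _ _ _ _ hhead, ih r hrl]
        have hfd : PySem.Int.floordiv (1 + (n : Int)) (2 ^ bit.toNat + 1)
            = (1 + (n : Int)) / (2 ^ bit.toNat + 1) :=
          PySem.Int.floordiv_eq_ediv_of_pos (by omega)
        have hrw : pvRunsB bit ((0 : Int) :: xs)
            = PySem.Int.floordiv (1 + (n : Int)) (2 ^ bit.toNat + 1) + pvRunsB bit r := by
          simp [pvRunsB, ← hn, ← hr]
        rw [hrw, hfd]
        push_cast
        ring_nf
      · have h1 : pvGo (2 ^ bit.toNat) c 0 (x :: xs) = pvGo (2 ^ bit.toNat) (c + 1) 0 xs := by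
          simp [pvGo, hx]
        rw [h1, pvGo_nonzero_run (2 ^ bit.toNat) xs (c + 1)]
        set n := (pvSpanB (fun y => y != 0) xs).1 with hn
        set r := (pvSpanB (fun y => y != 0) xs).2 with hr
        have hrl : r.length ≤ k := by
          have := pvSpanB_len_le (fun y => y != 0) xs
          simp at hl
          rw [← hr] at this
          omega
        rw [ih r hrl]
        have hrw : pvRunsB bit (x :: xs) = (1 + (n : Int)) + pvRunsB bit r := by
          simp [pvRunsB, hx, ← hn, ← hr]
        rw [hrw]
        ring

-- ===== VERDICT (by name: the statement is the Claim_ definition above) =====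
theorem compute_overhead_spec : Claim_equal_compute_overhead := by
  intro encoding bit _ hbit
  unfold Pre_compute_overhead at hbit
  unfold Spec_compute_overhead compute_overhead compute_overhead_alt
  rw [if_pos hbit]
  rw [pvFold_eq_go (2 ^ bit.toNat) encoding 0 0,
      pvGo_eq_runs bit hbit encoding.length encoding le_rfl 0]
  ring
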